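-- pv_equiv track=rewrite | github.com/DevilCoders/Yandex | library/python/django-multic/multic/views.py | fetch_filters
-- ===== SOURCE A (Python) =====
-- def fetch_filters(get_params):
--     """
--     Достать из запроса параметры, которые относятся к фильтрации.
--     Они имеют вид <resource_type>__<filter_name>=<filter_value>
--     """
--     filters = {}
--     for key, value in get_params.items():
--         if '__' not in key:
--             continue
--         resource_type, filter_name = key.split('__', 1)
--         resource_filters = filters.setdefault(resource_type, {})
--         resource_filters[filter_name] = value
--     return filters
-- ===== SOURCE B (Python) =====
-- def fetch_filters(get_params):
--     """
--     Two-phase re-implementation: parse all qualifying params into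
--     (resource_type, filter_name, value) triples, dedupe the resource
--     types to fix the outer order, then build each inner dict by a
--     per-type comprehension over the triples.
--     """
--     triples = [tuple(k.split('__', 1)) + (v,)
--                for k, v in get_params.items() if '__' in k]
--     order = list(dict.fromkeys(rt for rt, _, _ in triples))
--     return {rt: dict((fn, v) for r, fn, v in triples if r == rt)
--             for rt in order}
-- ===== Notes on version B (the rewrite author's own statement) =====
-- stated objective: alternative
-- what changed: Replaces A's single-pass setdefault accumulation into a nested dict with a two-phase computation: first parse all qualifying params into (resource_type, filter_name, value) triples, then dedupe the resource types for the outer order and build each inner dict by a per-type comprehension over the triples.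
import Mathlib
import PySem

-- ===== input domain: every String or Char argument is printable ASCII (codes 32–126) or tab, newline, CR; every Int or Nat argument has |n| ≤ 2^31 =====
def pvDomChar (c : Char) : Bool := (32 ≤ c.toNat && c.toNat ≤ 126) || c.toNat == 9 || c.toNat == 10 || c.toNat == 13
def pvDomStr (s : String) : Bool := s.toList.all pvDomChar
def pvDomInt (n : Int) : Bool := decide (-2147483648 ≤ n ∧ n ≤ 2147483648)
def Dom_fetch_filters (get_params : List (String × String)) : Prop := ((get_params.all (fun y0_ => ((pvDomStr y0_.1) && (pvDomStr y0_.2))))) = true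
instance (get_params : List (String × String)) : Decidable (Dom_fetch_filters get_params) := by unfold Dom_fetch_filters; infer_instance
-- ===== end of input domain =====

-- B replaces A's single-pass setdefault accumulation by a two-phase parse-then-group computation (objective: alternative).

-- ===== PORT A =====
-- literal port of A: fold over the params, skipping keys without '__', splitting each
-- qualifying key once and updating the nested dict; the final map unwraps the inner dicts.
def fetch_filters (get_params : List (String × String)) : List (String × List (String × String)) :=
  ((get_params.foldl
      (fun (filters : PySem.Dict String (PySem.Dict String String)) kv =>
        if PySem.Str.isIn "__" kv.1 = false then filters
        else
          match PySem.Str.splitMax? kv.1 "__" 1 with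
          | some (resource_type :: filter_name :: _) =>
              PySem.Dict.modify (PySem.Dict.setdefault filters resource_type (PySem.Dict.mk []))
                resource_type (PySem.Dict.mk [])
                (fun resource_filters => resource_filters.insert filter_name kv.2)
          | _ => filters)  -- unreachable totalisation branch: split('__',1) of a key containing '__' has 2 pieces
      (PySem.Dict.mk [])).items).map (fun p => (p.1, p.2.items))

-- ===== PORT B =====
-- the qualifying triples (resource_type, filter_name, value), in param order
def ffTriples (get_params : List (String × String)) : List (String × String × String) :=
  get_params.filterMap (fun kv =>
    if PySem.Str.isIn "__" kv.1 then
      match PySem.Str.splitMax? kv.1 "__" 1 with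
      | none => none         -- unreachable totalisation branches, as in port A
      | some [] => none
      | some [_] => none
      | some (rt :: fn :: _) => some (rt, fn, kv.2)
    else none)

-- dict((fn, v) for r, fn, v in triples if r == rt)
def ffInner (triples : List (String × String × String)) (rt : String) : PySem.Dict String String :=
  PySem.Dict.update (PySem.Dict.mk [])
    (triples.filterMap (fun t => if t.1 = rt then some t.2 else none))

def fetch_filters_alt (get_params : List (String × String)) : List (String × List (String × String)) :=
  let triples := ffTriples get_params
  let order := PySem.List.dedup (triples.map (fun t => t.1))
  -- the outer dict comprehension ranges over the deduped (hence distinct) types, so it is a plain map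
  order.map (fun rt => (rt, (ffInner triples rt).items))

-- ===== PRECONDITION & SPEC =====
def Spec_fetch_filters (get_params : List (String × String)) (out : List (String × List (String × String))) : Prop := out = fetch_filters_alt get_params
instance (get_params : List (String × String)) (out : List (String × List (String × String))) : Decidable (Spec_fetch_filters get_params out) := by unfold Spec_fetch_filters; infer_instance

-- ===== CLAIM (what is proved, stated in full; the proofs are below) =====
def Claim_equal_fetch_filters : Prop := ∀ (get_params : List (String × String)), Dom_fetch_filters get_params → Spec_fetch_filters get_params (fetch_filters get_params)

-- ===== LEMMAS AND PROOFS =====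

-- A's loop step, expressed on a parsed triple
def ffStep (filters : PySem.Dict String (PySem.Dict String String)) (t : String × String × String) :
    PySem.Dict String (PySem.Dict String String) :=
  PySem.Dict.modify (PySem.Dict.setdefault filters t.1 (PySem.Dict.mk [])) t.1 (PySem.Dict.mk [])
    (fun resource_filters => resource_filters.insert t.2.1 t.2.2)

-- A's fold fuses with the triple extraction
lemma fetch_fuse (get_params : List (String × String))
    (init : PySem.Dict String (PySem.Dict String String)) :
    get_params.foldl
      (fun (filters : PySem.Dict String (PySem.Dict String String)) kv =>
        if PySem.Str.isIn "__" kv.1 = false then filters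
        else
          match PySem.Str.splitMax? kv.1 "__" 1 with
          | some (resource_type :: filter_name :: _) =>
              PySem.Dict.modify (PySem.Dict.setdefault filters resource_type (PySem.Dict.mk []))
                resource_type (PySem.Dict.mk [])
                (fun resource_filters => resource_filters.insert filter_name kv.2)
          | _ => filters)
      init
    = (ffTriples get_params).foldl ffStep init := by
  induction get_params generalizing init with
  | nil => rfl
  | cons kv rest ih =>
      simp only [List.foldl_cons, ffTriples, List.filterMap_cons]
      by_cases h : PySem.Str.isIn "__" kv.1 = true
      · simp only [h, if_true, Bool.true_eq_false, if_false]
        cases hs : PySem.Str.splitMax? kv.1 "__" 1 with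
        | none => exact ih init
        | some l =>
            match l with
            | [] => exact ih init
            | [a] => exact ih init
            | (a :: b :: r) => simp only [List.foldl_cons]; exact ih _
      · simp only [Bool.not_eq_true] at h
        simp only [h, if_true]
        exact ih init

lemma ffInner_append (ts : List (String × String × String)) (t : String × String × String) (rt : String) :
    ffInner (ts ++ [t]) rt = if t.1 = rt then (ffInner ts rt).insert t.2.1 t.2.2 else ffInner ts rt := by
  simp only [ffInner, List.filterMap_append, PySem.Dict.update, List.foldl_append]
  by_cases h : t.1 = rt <;> simp [h]

lemma find_map_self {ν : Type} (order : List String) (h : String → ν) (rt : String) (hmem : rt ∈ order) :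
    (order.map (fun rt' => (rt', h rt'))).find? (fun p => p.1 == rt) = some (rt, h rt) := by
  induction order with
  | nil => cases hmem
  | cons a rest ih =>
      simp only [List.map_cons, List.find?_cons]
      by_cases hak : a = rt
      · subst hak; simp
      · have : (a == rt) = false := by simp [hak]
        simp only [this]
        exact ih (by cases hmem with
          | head => exact absurd rfl hak
          | tail _ h => exact h)

lemma dedup_append_singleton {α : Type} [BEq α] [LawfulBEq α] (xs : List α) (x : α) :
    PySem.List.dedup (xs ++ [x]) =
      if x ∈ xs then PySem.List.dedup xs else PySem.List.dedup xs ++ [x] := by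
  simp only [PySem.List.dedup, PySem.Set.ofList_eq_foldl, List.foldl_append, List.foldl_cons,
    List.foldl_nil]
  rw [show List.foldl PySem.Set.add [] xs = PySem.Set.ofList xs from (PySem.Set.ofList_eq_foldl xs).symm]
  by_cases h : x ∈ xs <;> simp [PySem.Set.add, h]

-- the main invariant: A's fold over the triples produces exactly B's grouped structure
lemma fold_eq_group (ts : List (String × String × String)) :
    (ts.foldl ffStep (PySem.Dict.mk [])).items
      = (PySem.List.dedup (ts.map (fun t => t.1))).map (fun rt => (rt, ffInner ts rt)) := by
  induction ts using List.reverseRecOn with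
  | nil => rfl
  | append_singleton ts t ih =>
      rw [List.foldl_append, List.foldl_cons, List.foldl_nil, List.map_append, List.map_cons,
        List.map_nil, dedup_append_singleton]
      have hkeys : (ts.foldl ffStep (PySem.Dict.mk [])).items.map Prod.fst
          = PySem.List.dedup (ts.map (fun t => t.1)) := by
        rw [ih, List.map_map]
        rw [show (Prod.fst ∘ fun rt => (rt, ffInner ts rt)) = id from rfl, List.map_id]
      have hcont : (ts.foldl ffStep (PySem.Dict.mk [])).contains t.1
          = decide (t.1 ∈ ts.map (fun t => t.1)) := by
        rw [PySem.Dict.contains_eq_decide_mem_keys, PySem.Dict.keys, hkeys]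
        simp

      by_cases hmem : t.1 ∈ ts.map (fun t => t.1)
      · -- the resource type is already present: setdefault is a no-op, modify rewrites its entry
        rw [if_pos hmem]
        have hc : (ts.foldl ffStep (PySem.Dict.mk [])).contains t.1 = true := by
          rw [hcont]; simp [hmem]
        show (ffStep _ t).items = _
        rw [show ∀ (F : PySem.Dict String (PySem.Dict String String)), ffStep F t
            = PySem.Dict.modify (PySem.Dict.setdefault F t.1 (PySem.Dict.mk [])) t.1 (PySem.Dict.mk [])
              (fun rf => rf.insert t.2.1 t.2.2) from fun _ => rfl]
        rw [PySem.Dict.setdefault_of_contains _ _ hc]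
        have hget : (ts.foldl ffStep (PySem.Dict.mk [])).get? t.1 = some (ffInner ts t.1) := by
          unfold PySem.Dict.get?
          rw [ih, find_map_self _ _ _ (by rwa [PySem.List.mem_dedup])]
          rfl
        unfold PySem.Dict.modify
        rw [PySem.Dict.insert, if_pos hc]
        show ((ts.foldl ffStep (PySem.Dict.mk [])).items.map _) = _
        rw [ih, List.map_map]
        apply List.map_congr_left
        intro rt hrt
        have hgetD : PySem.Dict.getD (ts.foldl ffStep (PySem.Dict.mk [])) t.1 (PySem.Dict.mk [])
            = ffInner ts t.1 := by rw [PySem.Dict.getD, hget]; rfl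
        by_cases hr : rt = t.1
        · subst hr
          simp only [Function.comp_apply, beq_self_eq_true, if_pos]
          rw [hgetD, ffInner_append, if_pos rfl]
        · have : (rt == t.1) = false := by simp [hr]
          simp only [Function.comp_apply, this, Bool.false_eq_true, if_false]
          rw [ffInner_append, if_neg (fun hh => hr hh.symm)]
      · -- a new resource type: setdefault appends an empty inner dict, modify fills it
        rw [if_neg hmem]
        have hc : (ts.foldl ffStep (PySem.Dict.mk [])).contains t.1 = false := by
          rw [hcont]; simp [hmem]
        show (ffStep _ t).items = _
        rw [show ∀ (F : PySem.Dict String (PySem.Dict String String)), ffStep F t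
            = PySem.Dict.modify (PySem.Dict.setdefault F t.1 (PySem.Dict.mk [])) t.1 (PySem.Dict.mk [])
              (fun rf => rf.insert t.2.1 t.2.2) from fun _ => rfl]
        rw [PySem.Dict.setdefault_of_not_contains _ _ hc]
        set F := List.foldl ffStep (PySem.Dict.mk []) ts with hF
        unfold PySem.Dict.modify
        have hgetD : PySem.Dict.getD (F.insert t.1 (PySem.Dict.mk [])) t.1 (PySem.Dict.mk [])
            = PySem.Dict.mk [] := by
          rw [PySem.Dict.getD, PySem.Dict.get?_insert_self]; rfl
        rw [hgetD]
        rw [PySem.Dict.items_insert_of_contains _ _ (PySem.Dict.contains_insert_self _ _ _)]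
        rw [PySem.Dict.items_insert_of_not_contains _ _ hc, List.map_append, List.map_cons,
          List.map_nil, List.map_append, List.map_cons, List.map_nil]
        simp only [beq_self_eq_true, if_pos]
        congr 1
        · -- old entries keep their key ≠ t.1 and their inner dict
          rw [ih]
          rw [List.map_map]
          apply List.map_congr_left
          intro rt hrt
          have hrt' : rt ∈ ts.map (fun t => t.1) := (PySem.List.mem_dedup _ _).mp hrt
          have hne : (rt == t.1) = false := by
            simp only [beq_eq_false_iff_ne, ne_eq]
            intro h; exact hmem (h ▸ hrt')
          simp only [Function.comp_apply, hne, Bool.false_eq_true, if_false]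
          rw [ffInner_append, if_neg (fun hh => hmem (by rw [hh]; exact hrt'))]
        · -- the new entry: its inner dict is exactly the singleton for t
          have hnil : ts.filterMap (fun t' => if t'.1 = t.1 then some t'.2 else none) = [] := by
            rw [List.filterMap_eq_nil_iff]
            intro t' ht'
            have hne2 : t'.1 ≠ t.1 := fun h => hmem (h ▸ List.mem_map_of_mem ht')
            simp [hne2]
          have hempty : ffInner ts t.1 = PySem.Dict.mk [] := by
            unfold ffInner; rw [hnil]; rfl
          rw [ffInner_append, if_pos rfl, hempty]

-- ===== VERDICT (by name: the statement is the Claim_ definition above) =====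
theorem fetch_filters_spec : Claim_equal_fetch_filters := by
  intro gp _
  show _ = _
  unfold fetch_filters fetch_filters_alt
  rw [fetch_fuse, fold_eq_group, List.map_map]
  rfl
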